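-- pv_equiv track=rewrite | github.com/jpascher/T0-Time-Mass-Duality | convert_dvft_md_to_latex.py | convert_headers_to_sections
-- ===== SOURCE A (Python) =====
-- def convert_headers_to_sections(text):
--     """Convert Markdown headers to LaTeX sections."""
--     lines = text.split('\n')
--     result = []
--
--     for line in lines:
--         # Skip the first header (chapter title) as it will be used as document title
--         if line.startswith('# '):
--             # This is the main chapter title - skip it as we handle it separately
--             continue
--         elif line.startswith('## '):
--             # Convert ## to \section{}
--             title = line[3:].strip()
--             result.append(f'\\section{{{title}}}')
--         elif line.startswith('### '):
--             # Convert ### to \subsection{}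
--             title = line[4:].strip()
--             result.append(f'\\subsection{{{title}}}')
--         elif line.startswith('#### '):
--             # Convert #### to \subsubsection{}
--             title = line[5:].strip()
--             result.append(f'\\subsubsection{{{title}}}')
--         else:
--             result.append(line)
--
--     return '\n'.join(result)
-- ===== SOURCE B (Python) =====
-- def convert_headers_to_sections(text):
--     """Convert Markdown headers to LaTeX sections (raw-string scan, no split/join)."""
--     cmds = ('\\section', '\\subsection', '\\subsubsection')
--     buf = []          # flat output chunks
--     sep = ''          # separator to place before the next emitted chunk
--     i = 0
--     while True:
--         nl = text.find('\n', i)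
--         line = text[i:] if nl < 0 else text[i:nl]
--         k = 0
--         while k < len(line) and line[k] == '#':
--             k += 1
--         if 1 <= k <= 4 and k < len(line) and line[k] == ' ':
--             if k >= 2:
--                 buf.append(sep)
--                 buf.append(cmds[k - 2])
--                 buf.append('{')
--                 buf.append(line[k + 1:].strip())
--                 buf.append('}')
--                 sep = '\n'
--             # k == 1: chapter title, emit nothing
--         else:
--             buf.append(sep)
--             buf.append(line)
--             sep = '\n'
--         if nl < 0:
--             return ''.join(buf)
--         i = nl + 1
-- ===== Notes on version B (the rewrite author's own statement) =====
-- stated objective: alternative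
-- what changed: B never splits the text into a list of lines nor joins a result list: it scans the raw string once with find('\n'), classifies each line by the length of its leading '#' run with a tuple lookup, and emits chunks into a flat buffer with an explicit separator-state variable instead of building a line list and '\n'.join-ing it.
import Mathlib
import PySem

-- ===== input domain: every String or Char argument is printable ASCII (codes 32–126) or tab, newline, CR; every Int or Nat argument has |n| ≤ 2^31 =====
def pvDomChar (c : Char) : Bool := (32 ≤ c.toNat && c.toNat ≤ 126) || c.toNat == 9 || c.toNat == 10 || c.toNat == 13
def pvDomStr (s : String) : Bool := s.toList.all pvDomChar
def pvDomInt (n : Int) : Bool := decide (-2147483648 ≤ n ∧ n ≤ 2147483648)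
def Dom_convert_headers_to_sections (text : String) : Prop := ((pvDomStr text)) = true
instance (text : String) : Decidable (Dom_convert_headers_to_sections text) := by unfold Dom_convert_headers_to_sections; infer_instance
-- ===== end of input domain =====

-- B drops A's split-into-lines / result-list / '\n'.join pipeline: it scans the raw
-- string once, classifying each line by its leading '#' run, and emits output chunks
-- into one flat buffer with an explicit separator state (objective: alternative).

-- ===== PORT A =====
-- one loop iteration of A (the `continue` branch leaves the accumulator unchanged);
-- f'\section{{{t}}}' is ported as list concatenation on the code points (exact)
def pvStepA (acc : List (List Char)) (ln : List Char) : List (List Char) :=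
  if PySem.Chars.startswith ln "# ".toList then acc
  else if PySem.Chars.startswith ln "## ".toList then
    acc ++ ["\\section{".toList ++ PySem.Chars.strip (PySem.Chars.slice ln (some 3) none) ++ "}".toList]
  else if PySem.Chars.startswith ln "### ".toList then
    acc ++ ["\\subsection{".toList ++ PySem.Chars.strip (PySem.Chars.slice ln (some 4) none) ++ "}".toList]
  else if PySem.Chars.startswith ln "#### ".toList then
    acc ++ ["\\subsubsection{".toList ++ PySem.Chars.strip (PySem.Chars.slice ln (some 5) none) ++ "}".toList]
  else acc ++ [ln]

def convert_headers_to_sections (text : String) : String :=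
  String.ofList (PySem.Chars.join "\n".toList
    ((PySem.Chars.splitOn text.toList "\n".toList).foldl pvStepA []))

-- ===== PORT B =====
-- the tuple ('\section', '\subsection', '\subsubsection'); cmds[k-2] → getD (k-2) []
def pvCmdsB : List (List Char) :=
  ["\\section".toList, "\\subsection".toList, "\\subsubsection".toList]

-- text.find('\n', i) + the slices text[i:nl] / restart at nl+1 are ported as splitting
-- the remaining suffix of the text at its first '\n' (exact: same line, same rest)
def pvSplitLine : List Char → List Char × Option (List Char)
  | [] => ([], none)
  | c :: t =>
    if c = '\n' then ([], some t)
    else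
      let (l, r) := pvSplitLine t
      (c :: l, r)

lemma pvSplitLine_rest_lt : ∀ (s r : List Char), (pvSplitLine s).2 = some r → r.length < s.length := by
  intro s
  induction s with
  | nil => intro r h; simp [pvSplitLine] at h
  | cons c t ih =>
    intro r h
    by_cases hc : c = '\n'
    · simp [pvSplitLine, hc] at h; subst h; simp
    · simp [pvSplitLine, hc] at h
      have := ih r h
      simp; omega

-- the main loop of B: buf is the flat chunk buffer, sep the pending separator;
-- the inner `while` counting '#' is ported as takeWhile-length (same count)
def pvGoB (s : List Char) (buf : List Char) (sep : List Char) : List Char :=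
  let p := pvSplitLine s
  let line := p.1
  let k := (line.takeWhile (· == '#')).length
  let bs :=
    if 1 ≤ k ∧ k ≤ 4 ∧ getElem? line k = some ' ' then
      if 2 ≤ k then
        (buf ++ sep ++ pvCmdsB.getD (k - 2) [] ++ ['{'] ++
          PySem.Chars.strip (line.drop (k + 1)) ++ ['}'], ['\n'])
      else (buf, sep)
    else (buf ++ sep ++ line, ['\n'])
  match h : p.2 with
  | none => bs.1
  | some r => pvGoB r bs.1 bs.2
termination_by s.length
decreasing_by exact pvSplitLine_rest_lt s r h

def convert_headers_to_sections_alt (text : String) : String :=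
  String.ofList (pvGoB text.toList [] [])

-- ===== PRECONDITION & SPEC =====
def Spec_convert_headers_to_sections (text : String) (out : String) : Prop := out = convert_headers_to_sections_alt text
instance (text : String) (out : String) : Decidable (Spec_convert_headers_to_sections text out) := by unfold Spec_convert_headers_to_sections; infer_instance

-- ===== CLAIM (what is proved, stated in full; the proofs are below) =====
def Claim_equal_convert_headers_to_sections : Prop := ∀ (text : String), Dom_convert_headers_to_sections text → Spec_convert_headers_to_sections text (convert_headers_to_sections text)

-- ===== LEMMAS AND PROOFS =====

-- what A does to a single line, as an Option (none = the `continue` branch)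
def pvRenderA (ln : List Char) : Option (List Char) :=
  if PySem.Chars.startswith ln "# ".toList then none
  else if PySem.Chars.startswith ln "## ".toList then
    some ("\\section{".toList ++ PySem.Chars.strip (PySem.Chars.slice ln (some 3) none) ++ "}".toList)
  else if PySem.Chars.startswith ln "### ".toList then
    some ("\\subsection{".toList ++ PySem.Chars.strip (PySem.Chars.slice ln (some 4) none) ++ "}".toList)
  else if PySem.Chars.startswith ln "#### ".toList then
    some ("\\subsubsection{".toList ++ PySem.Chars.strip (PySem.Chars.slice ln (some 5) none) ++ "}".toList)
  else some ln

lemma pvStepA_render (acc : List (List Char)) (ln : List Char) :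
    pvStepA acc ln = acc ++ (pvRenderA ln).toList := by
  unfold pvStepA pvRenderA
  split_ifs <;> simp

lemma pvFoldA_render (lines : List (List Char)) (acc : List (List Char)) :
    lines.foldl pvStepA acc = acc ++ lines.filterMap pvRenderA := by
  induction lines generalizing acc with
  | nil => simp
  | cons l ls ih =>
    simp only [List.foldl_cons, pvStepA_render, ih, List.filterMap_cons]
    cases pvRenderA l <;> simp

-- B's per-line classification equals A's
lemma pvRenderB_eq (line : List Char) :
    (let k := (line.takeWhile (· == '#')).length
     if 1 ≤ k ∧ k ≤ 4 ∧ getElem? line k = some ' ' then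
       if 2 ≤ k then
         some (pvCmdsB.getD (k - 2) [] ++ ['{'] ++
           PySem.Chars.strip (line.drop (k + 1)) ++ ['}'])
       else none
     else some line) = pvRenderA line := by
  rcases line with _ | ⟨a, tl⟩
  · simp [pvRenderA, PySem.Chars.startswith]
  by_cases ha : a = '#'
  case neg =>
    simp [pvRenderA, PySem.Chars.startswith, List.isPrefixOf, Ne.symm ha, ha, List.takeWhile_cons, beq_iff_eq]
  subst ha
  rcases tl with _ | ⟨b, tl⟩
  · simp [pvRenderA, PySem.Chars.startswith, List.isPrefixOf, List.takeWhile_cons, beq_iff_eq]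
  by_cases hb : b = ' '
  · subst hb
    simp [pvRenderA, PySem.Chars.startswith, List.isPrefixOf, List.takeWhile_cons, beq_iff_eq]
  by_cases hb2 : b = '#'
  case neg =>
    simp [pvRenderA, PySem.Chars.startswith, List.isPrefixOf, Ne.symm hb, Ne.symm hb2, hb, hb2, List.takeWhile_cons, beq_iff_eq]
  subst hb2
  rcases tl with _ | ⟨c, tl⟩
  · simp [pvRenderA, PySem.Chars.startswith, List.isPrefixOf, List.takeWhile_cons, beq_iff_eq]
  by_cases hc : c = ' '
  · subst hc
    simp [pvRenderA, PySem.Chars.startswith, List.isPrefixOf, List.takeWhile_cons, beq_iff_eq, pvCmdsB,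
      PySem.List.slice_from]
  by_cases hc2 : c = '#'
  case neg =>
    simp [pvRenderA, PySem.Chars.startswith, List.isPrefixOf, Ne.symm hc, Ne.symm hc2, hc, hc2, List.takeWhile_cons, beq_iff_eq]
  subst hc2
  rcases tl with _ | ⟨d, tl⟩
  · simp [pvRenderA, PySem.Chars.startswith, List.isPrefixOf, List.takeWhile_cons, beq_iff_eq]
  by_cases hd : d = ' '
  · subst hd
    simp [pvRenderA, PySem.Chars.startswith, List.isPrefixOf, List.takeWhile_cons, beq_iff_eq, pvCmdsB, PySem.List.slice_from]
  by_cases hd2 : d = '#'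
  case neg =>
    simp [pvRenderA, PySem.Chars.startswith, List.isPrefixOf, Ne.symm hd, Ne.symm hd2, hd, hd2, List.takeWhile_cons, beq_iff_eq]
  subst hd2
  rcases tl with _ | ⟨e, tl⟩
  · simp [pvRenderA, PySem.Chars.startswith, List.isPrefixOf, List.takeWhile_cons, beq_iff_eq]
  by_cases he : e = ' '
  · subst he
    simp [pvRenderA, PySem.Chars.startswith, List.isPrefixOf, List.takeWhile_cons, beq_iff_eq, pvCmdsB, PySem.List.slice_from]
  by_cases he2 : e = '#'
  case neg =>
    simp [pvRenderA, PySem.Chars.startswith, List.isPrefixOf, Ne.symm he, he, he2, List.takeWhile_cons, beq_iff_eq]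
  subst he2
  simp [pvRenderA, PySem.Chars.startswith, List.isPrefixOf, List.takeWhile_cons, beq_iff_eq]

-- the list of lines of s (split at every '\n')
def pvLines : List Char → List (List Char)
  | [] => [[]]
  | c :: t =>
    if c = '\n' then [] :: pvLines t
    else
      match pvLines t with
      | [] => [[c]]
      | l :: ls => (c :: l) :: ls

lemma pvLines_ne_nil (s : List Char) : pvLines s ≠ [] := by
  cases s with
  | nil => simp [pvLines]
  | cons c t =>
    simp only [pvLines]
    split_ifs
    · simp
    · cases pvLines t <;> simp

lemma pvLines_splitLine (s : List Char) :
    pvLines s = (pvSplitLine s).1 ::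
      (match (pvSplitLine s).2 with | none => [] | some r => pvLines r) := by
  induction s with
  | nil => simp [pvLines, pvSplitLine]
  | cons c t ih =>
    by_cases hc : c = '\n'
    · simp [pvLines, pvSplitLine, hc]
    · simp only [pvLines, pvSplitLine, hc, if_neg hc]
      rw [ih]
      simp

-- splitOn with separator "\n" computes pvLines
def pvConsHead (p : List Char) : List (List Char) → List (List Char)
  | [] => [p]
  | x :: xs => (p ++ x) :: xs

lemma pvConsHead_nil (l : List (List Char)) (h : l ≠ []) : pvConsHead [] l = l := by
  cases l with
  | nil => exact absurd rfl h
  | cons x xs => simp [pvConsHead]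

lemma pvGo_lines (fuel : ℕ) : ∀ (l cur : List Char) (acc : List (List Char)),
    l.length < fuel →
    PySem.Chars.splitOn.go ['\n'] fuel l cur acc
      = acc.reverse ++ pvConsHead cur.reverse (pvLines l) := by
  induction fuel with
  | zero => intro l cur acc h; omega
  | succ f ih =>
    intro l cur acc h
    cases l with
    | nil =>
      simp [PySem.Chars.splitOn.go, pvLines, pvConsHead]
    | cons c rest =>
      by_cases hc : c = '\n'
      · subst hc
        rw [PySem.Chars.splitOn.go]
        have hpre : List.isPrefixOf ['\n'] ('\n' :: rest) = true := by
          simp [List.isPrefixOf]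
        simp only [hpre, if_true, List.length_cons, List.length_nil, List.drop_succ_cons,
          List.drop_zero]
        rw [ih rest [] _ (by simp at h ⊢; omega)]
        simp only [List.reverse_nil]
        rw [pvConsHead_nil _ (pvLines_ne_nil rest)]
        simp [pvLines, pvConsHead]
      · rw [PySem.Chars.splitOn.go]
        have hpre : List.isPrefixOf ['\n'] (c :: rest) = false := by
          simp [List.isPrefixOf]
          exact fun h => hc h.symm
        simp only [hpre, Bool.false_eq_true, if_false]
        rw [ih rest (c :: cur) _ (by simp at h ⊢; omega)]
        obtain ⟨x, xs, hx⟩ : ∃ x xs, pvLines rest = x :: xs := by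
          cases hr : pvLines rest with
          | nil => exact absurd hr (pvLines_ne_nil rest)
          | cons x xs => exact ⟨x, xs, rfl⟩
        simp [pvLines, hc, hx, pvConsHead]

lemma pvSplitOn_lines (s : List Char) :
    PySem.Chars.splitOn s "\n".toList = pvLines s := by
  have : "\n".toList = ['\n'] := by decide
  rw [this]
  unfold PySem.Chars.splitOn
  rw [pvGo_lines (s.length + 1) s [] [] (by omega)]
  simp [pvConsHead_nil _ (pvLines_ne_nil s)]

-- the emitted output of B for a list of lines, starting with separator sep
def pvEmit (sep : List Char) : List (List Char) → List Char
  | [] => []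
  | ln :: ls =>
    match pvRenderA ln with
    | some p => sep ++ p ++ pvEmit ['\n'] ls
    | none => pvEmit sep ls

lemma pvEmit_join (lines : List (List Char)) : ∀ (sep : List Char),
    pvEmit sep lines
      = match lines.filterMap pvRenderA with
        | [] => []
        | ps => sep ++ PySem.Chars.join ['\n'] ps := by
  induction lines with
  | nil => intro sep; simp [pvEmit]
  | cons ln ls ih =>
    intro sep
    cases hr : pvRenderA ln with
    | none => simp only [pvEmit, hr, List.filterMap_cons, ih]
    | some p =>
      simp only [pvEmit, hr, List.filterMap_cons, ih ['\n']]
      cases hps : ls.filterMap pvRenderA with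
      | nil => simp [PySem.Chars.join, List.intercalate, List.intersperse]
      | cons q qs =>
        simp [PySem.Chars.join, List.intercalate, List.intersperse]

-- the loop invariant of B
lemma pvGoB_emit : ∀ (s buf sep : List Char),
    pvGoB s buf sep = buf ++ pvEmit sep (pvLines s) := by
  intro s
  induction hn : s.length using Nat.strong_induction_on generalizing s with
  | _ n ihn =>
    intro buf sep
    subst hn
    rw [pvGoB, pvLines_splitLine s]
    have hb := pvRenderB_eq (pvSplitLine s).1
    simp only at hb
    set L := (pvSplitLine s).1 with hL
    set k := (L.takeWhile (· == '#')).length with hk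
    cases hrest : (pvSplitLine s).2 with
    | none =>
      simp only [hrest]
      by_cases h1 : (1 ≤ k ∧ k ≤ 4 ∧ getElem? L k = some ' ')
      · by_cases h2 : 2 ≤ k
        · rw [if_pos h1, if_pos h2] at hb
          rw [if_pos h1, if_pos h2]
          simp only [pvEmit, ← hb]
          simp
        · rw [if_pos h1, if_neg h2] at hb
          rw [if_pos h1, if_neg h2]
          simp only [pvEmit, ← hb]
          simp
      · rw [if_neg h1] at hb
        rw [if_neg h1]
        simp only [pvEmit, ← hb]
        simp
    | some r =>
      simp only [hrest]
      have hlt := pvSplitLine_rest_lt s r hrest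
      by_cases h1 : (1 ≤ k ∧ k ≤ 4 ∧ getElem? L k = some ' ')
      · by_cases h2 : 2 ≤ k
        · rw [if_pos h1, if_pos h2] at hb
          rw [if_pos h1, if_pos h2]
          rw [ihn r.length hlt r rfl]
          simp only [pvEmit, ← hb]
          simp
        · rw [if_pos h1, if_neg h2] at hb
          rw [if_pos h1, if_neg h2]
          rw [ihn r.length hlt r rfl]
          simp only [pvEmit, ← hb]
      · rw [if_neg h1] at hb
        rw [if_neg h1]
        rw [ihn r.length hlt r rfl]
        simp only [pvEmit, ← hb]
        simp

-- ===== VERDICT (by name: the statement is the Claim_ definition above) =====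
theorem convert_headers_to_sections_spec : Claim_equal_convert_headers_to_sections := by
  intro text _
  unfold Spec_convert_headers_to_sections convert_headers_to_sections convert_headers_to_sections_alt
  rw [pvSplitOn_lines, pvFoldA_render, pvGoB_emit, pvEmit_join]
  cases hps : List.filterMap pvRenderA (pvLines text.toList) with
  | nil => simp [hps, PySem.Chars.join, List.intercalate]
  | cons q qs => simp [hps]
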